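-- pv_equiv track=rewrite | github.com/code-forge-reaper/neon | generate.py | convert_type
-- ===== SOURCE A (Python) =====
-- def convert_type(typ: str) -> str:
--     """
--     Convert Neon types to equivalent C types.
--     """
--     type_map = {
--         "number": "int",
--         "uint": "unsigned int",
--         "uchar": "unsigned char",
--         "ulong": "unsigned long",
--         "string": "const char*",
--         "boolean": "bool",
--         "pchar": "char*" # since Array expects a actual type
--     }
--     if typ in type_map:
--         return type_map[typ]
--     elif typ.startswith("ptr<") and typ.endswith(">"):
--         inner = convert_type(typ[4:-1])
--         return f"{inner}*"
--     elif typ.startswith("struct<") and typ.endswith(">"):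
--         inner = convert_type(typ[7:-1])
--         return f"struct {inner}"
--     else:
--         return typ
-- ===== SOURCE B (Python) =====
-- def convert_type(typ: str) -> str:
--     """
--     Convert Neon types to equivalent C types.
--     """
--     type_map = {
--         "number": "int",
--         "uint": "unsigned int",
--         "uchar": "unsigned char",
--         "ulong": "unsigned long",
--         "string": "const char*",
--         "boolean": "bool",
--         "pchar": "char*"
--     }
--     num_ptr = 0
--     num_struct = 0
--     while typ not in type_map:
--         if typ.startswith("ptr<") and typ.endswith(">"):
--             num_ptr += 1
--             typ = typ[4:-1]
--         elif typ.startswith("struct<") and typ.endswith(">"):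
--             num_struct += 1
--             typ = typ[7:-1]
--         else:
--             break
--     return "struct " * num_struct + type_map.get(typ, typ) + "*" * num_ptr
-- ===== Notes on version B (the rewrite author's own statement) =====
-- stated objective: alternative
-- what changed: Replaces A's per-wrapper recursion (each ptr/struct layer handled by a recursive call whose result is wrapped on return) with a single iterative peeling loop that counts ptr and struct wrappers, resolves the core name by one final map lookup, and assembles the struct prefixes, the core, and the pointer stars by repetition counts.
import Mathlib
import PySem

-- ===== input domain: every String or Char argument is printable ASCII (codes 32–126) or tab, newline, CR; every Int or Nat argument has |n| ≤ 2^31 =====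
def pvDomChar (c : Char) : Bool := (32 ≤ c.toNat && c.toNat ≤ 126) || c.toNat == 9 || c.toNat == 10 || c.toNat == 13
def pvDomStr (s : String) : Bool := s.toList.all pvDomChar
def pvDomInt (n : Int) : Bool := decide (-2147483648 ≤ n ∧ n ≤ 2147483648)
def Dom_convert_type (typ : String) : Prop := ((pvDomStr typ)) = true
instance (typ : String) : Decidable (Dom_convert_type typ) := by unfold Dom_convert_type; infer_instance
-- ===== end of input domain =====

-- B replaces A's per-wrapper recursion by one iterative peeling loop with ptr/struct counters and a
-- single final map lookup (objective: alternative decomposition; same cost).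

-- ===== PORT A =====
def neonTypeMap : PySem.Dict (List Char) (List Char) :=
  PySem.Dict.ofList [("number".toList, "int".toList), ("uint".toList, "unsigned int".toList),
    ("uchar".toList, "unsigned char".toList), ("ulong".toList, "unsigned long".toList),
    ("string".toList, "const char*".toList), ("boolean".toList, "bool".toList),
    ("pchar".toList, "char*".toList)]

-- termination helper: typ[4:-1] / typ[7:-1] is shorter when typ ends with ">"
theorem sliceInner_lt (cs : List Char) (a : Nat)
    (h : PySem.Chars.endswith cs ">".toList = true) :
    (PySem.List.slice cs (some (a : Int)) (some (-1))).length < cs.length := by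
  have h1 : 1 ≤ cs.length := by
    rcases (PySem.Chars.endswith_iff cs _).1 h with ⟨t, ht⟩
    have := congrArg List.length ht
    simp at this; omega
  rw [PySem.List.length_slice, PySem.List.clampIdx_neg_one]
  simp [PySem.List.clampIdx]
  omega

def convertA (cs : List Char) : List Char :=
  match PySem.Dict.get? neonTypeMap cs with
  | some v => v
  | none =>
    if h1 : (PySem.Chars.startswith cs "ptr<".toList && PySem.Chars.endswith cs ">".toList) = true then
      convertA (PySem.Chars.slice cs (some 4) (some (-1))) ++ "*".toList
    else if h2 : (PySem.Chars.startswith cs "struct<".toList && PySem.Chars.endswith cs ">".toList) = true then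
      "struct ".toList ++ convertA (PySem.Chars.slice cs (some 7) (some (-1)))
    else cs
termination_by cs.length
decreasing_by
  · simp only [PySem.Chars.slice_eq_listSlice]
    exact sliceInner_lt cs 4 (by simp only [Bool.and_eq_true] at h1; exact h1.2)
  · simp only [PySem.Chars.slice_eq_listSlice]
    exact sliceInner_lt cs 7 (by simp only [Bool.and_eq_true] at h2; exact h2.2)

def convert_type (typ : String) : String := String.ofList (convertA typ.toList)

-- ===== PORT B =====
def repChars (s : List Char) (n : Nat) : List Char := (List.replicate n s).flatten

def peelB (np ns : Nat) (cs : List Char) : Nat × Nat × List Char :=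
  if PySem.Dict.contains neonTypeMap cs then (np, ns, cs)
  else if h1 : (PySem.Chars.startswith cs "ptr<".toList && PySem.Chars.endswith cs ">".toList) = true then
    peelB (np + 1) ns (PySem.Chars.slice cs (some 4) (some (-1)))
  else if h2 : (PySem.Chars.startswith cs "struct<".toList && PySem.Chars.endswith cs ">".toList) = true then
    peelB np (ns + 1) (PySem.Chars.slice cs (some 7) (some (-1)))
  else (np, ns, cs)
termination_by cs.length
decreasing_by
  · simp only [PySem.Chars.slice_eq_listSlice]
    exact sliceInner_lt cs 4 (by simp only [Bool.and_eq_true] at h1; exact h1.2)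
  · simp only [PySem.Chars.slice_eq_listSlice]
    exact sliceInner_lt cs 7 (by simp only [Bool.and_eq_true] at h2; exact h2.2)

def convert_type_alt (typ : String) : String :=
  String.ofList (repChars "struct ".toList (peelB 0 0 typ.toList).2.1 ++
    PySem.Dict.getD neonTypeMap (peelB 0 0 typ.toList).2.2 (peelB 0 0 typ.toList).2.2 ++
    repChars "*".toList (peelB 0 0 typ.toList).1)

-- ===== PRECONDITION & SPEC =====  (A is total: no Pre_)
def Spec_convert_type (typ : String) (out : String) : Prop := out = convert_type_alt typ
instance (typ : String) (out : String) : Decidable (Spec_convert_type typ out) := by unfold Spec_convert_type; infer_instance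

-- ===== CLAIM =====
def Claim_equal_convert_type : Prop := ∀ (typ : String), Dom_convert_type typ → Spec_convert_type typ (convert_type typ)

-- ===== LEMMAS AND PROOFS =====
theorem repChars_succ (s : List Char) (n : Nat) : repChars s (n + 1) = s ++ repChars s n := by
  simp [repChars, List.replicate_succ]

theorem repChars_comm (s : List Char) (n : Nat) : repChars s n ++ s = s ++ repChars s n := by
  induction n with
  | zero => simp [repChars]
  | succ n ih => rw [repChars_succ, List.append_assoc, ih]

theorem peelB_finish (cs : List Char) (np ns : Nat) :
    repChars "struct ".toList (peelB np ns cs).2.1 ++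
      PySem.Dict.getD neonTypeMap (peelB np ns cs).2.2 (peelB np ns cs).2.2 ++
      repChars "*".toList (peelB np ns cs).1
    = repChars "struct ".toList ns ++ convertA cs ++ repChars "*".toList np := by
  fun_induction peelB np ns cs with
  | case1 np ns cs hc =>
    rw [PySem.Dict.contains_eq_isSome_get?] at hc
    rcases Option.isSome_iff_exists.1 hc with ⟨v, hv⟩
    rw [convertA]
    simp [hv, PySem.Dict.getD]
  | case2 np ns cs hc h1 ih =>
    rw [PySem.Dict.contains_eq_isSome_get?] at hc
    have hn : PySem.Dict.get? neonTypeMap cs = none := by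
      cases h : PySem.Dict.get? neonTypeMap cs <;> simp [h] at hc ⊢
    rw [ih]
    conv_rhs => rw [convertA]
    simp only [hn]
    rw [dif_pos h1, repChars_succ]
    simp [List.append_assoc]
  | case3 np ns cs hc h1 h2 ih =>
    rw [PySem.Dict.contains_eq_isSome_get?] at hc
    have hn : PySem.Dict.get? neonTypeMap cs = none := by
      cases h : PySem.Dict.get? neonTypeMap cs <;> simp [h] at hc ⊢
    rw [ih, repChars_succ]
    conv_rhs => rw [convertA]
    simp only [hn]
    rw [dif_neg h1, dif_pos h2, ← List.append_assoc, ← repChars_comm]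
  | case4 np ns cs hc h1 h2 =>
    rw [PySem.Dict.contains_eq_isSome_get?] at hc
    have hn : PySem.Dict.get? neonTypeMap cs = none := by
      cases h : PySem.Dict.get? neonTypeMap cs <;> simp [h] at hc ⊢
    rw [convertA]
    simp only [hn]
    rw [dif_neg h1, dif_neg h2]
    simp [PySem.Dict.getD, hn]

-- ===== VERDICT =====
theorem convert_type_spec : Claim_equal_convert_type := by
  intro typ _
  unfold Spec_convert_type convert_type convert_type_alt
  rw [peelB_finish]
  simp [repChars]
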